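-- pv_equiv track=rewrite | github.com/TrynD1/algorithm24 | 3장 연습문제 11번.py | generate_substrings
-- ===== SOURCE A (Python) =====
-- def generate_substrings(s):
--     n = len(s)
--     substrings = []
--     for i in range(n):
--         if s[i] == 'A':  # "A"로 시작하는 위치를 찾음
--             for j in range(i+1, n):
--                 if s[j] == 'B':  # 해당 "A" 이후에 "B"로 끝나는 위치를 찾음
--                     substrings.append(s[i:j + 1])  # i부터 j까지의 부분 문자열을 추가
--     return substrings
-- ===== SOURCE B (Python) =====
-- def generate_substrings(s):
--     # Single right-to-left pass: keep the ascending list of 'B' positions seen so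
--     # far (i.e. to the right of the cursor); on each 'A' prepend its substrings.
--     out = []
--     bpos = []  # positions of 'B' strictly to the right of the cursor, ascending
--     for i in reversed(range(len(s))):
--         c = s[i]
--         if c == 'A':
--             out = [s[i:j + 1] for j in bpos] + out
--         if c == 'B':
--             bpos = [i] + bpos
--     return out
-- ===== Notes on version B (the rewrite author's own statement) =====
-- stated objective: alternative
-- what changed: Replaces the nested forward scans (for each 'A', rescan the whole suffix for 'B') by a single right-to-left pass that maintains the list of 'B' positions to the right of the cursor and builds the output back-to-front.
import Mathlib
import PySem

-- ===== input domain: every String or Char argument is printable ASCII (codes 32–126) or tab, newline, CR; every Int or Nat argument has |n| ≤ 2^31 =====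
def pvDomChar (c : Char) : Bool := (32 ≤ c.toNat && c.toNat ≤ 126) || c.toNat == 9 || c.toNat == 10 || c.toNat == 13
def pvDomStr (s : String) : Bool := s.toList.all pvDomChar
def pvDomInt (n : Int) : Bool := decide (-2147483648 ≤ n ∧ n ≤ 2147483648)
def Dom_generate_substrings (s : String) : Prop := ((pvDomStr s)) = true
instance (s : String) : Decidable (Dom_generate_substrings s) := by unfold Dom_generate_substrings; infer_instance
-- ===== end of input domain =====

-- B replaces the nested forward scans by one right-to-left pass that maintains the
-- list of 'B' positions to the right of the cursor (objective: alternative algorithm).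

-- shared slice primitive: s[i:j+1] for Nat indices (exact: Python slice with
-- nonnegative in-range bounds is drop/take, per PySem.List.slice_natCast)
def pvSliceAB (cs : List Char) (i j : Nat) : String :=
  String.ofList (PySem.List.slice cs (some (i : Int)) (some ((j + 1 : Nat) : Int)))

-- ===== PORT A =====
def generate_substrings (s : String) : List String :=
  let cs := s.toList
  let n := cs.length
  (List.range n).foldl (fun substrings i =>
    if cs.getD i ' ' = 'A' then
      (List.range' (i + 1) (n - (i + 1))).foldl (fun substrings j =>
        if cs.getD j ' ' = 'B' then substrings ++ [pvSliceAB cs i j] else substrings)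
        substrings
    else substrings) []

-- ===== PORT B =====
def pvAltStep (cs : List Char) (st : List String × List Nat) (i : Nat) :
    List String × List Nat :=
  let c := cs.getD i ' '
  let out := if c = 'A' then (st.2.map (fun j => pvSliceAB cs i j)) ++ st.1 else st.1
  let bpos := if c = 'B' then i :: st.2 else st.2
  (out, bpos)

def generate_substrings_alt (s : String) : List String :=
  let cs := s.toList
  ((List.range cs.length).reverse.foldl (pvAltStep cs) ([], [])).1

-- ===== PRECONDITION & SPEC =====
def Spec_generate_substrings (s : String) (out : List String) : Prop := out = generate_substrings_alt s
instance (s : String) (out : List String) : Decidable (Spec_generate_substrings s out) := by unfold Spec_generate_substrings; infer_instance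

-- ===== CLAIM (what is proved, stated in full; the proofs are below) =====
def Claim_equal_generate_substrings : Prop := ∀ (s : String), Dom_generate_substrings s → Spec_generate_substrings s (generate_substrings s)

-- ===== LEMMAS AND PROOFS =====

-- generic: conditional-append foldl is flatMap over the filtered list
theorem pv_foldl_condAppend {α β : Type} (p : α → Prop) [DecidablePred p]
    (g : α → List β) (l : List α) :
    ∀ acc : List β,
      l.foldl (fun acc x => if p x then acc ++ g x else acc) acc
        = acc ++ (l.filter (fun x => decide (p x))).flatMap g := by
  induction l with
  | nil => intro acc; simp
  | cons h t ih =>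
    intro acc
    by_cases hp : p h <;> simp [List.foldl_cons, hp, ih]

theorem pv_flatMap_singleton {α β : Type} (f : α → β) (l : List α) :
    l.flatMap (fun x => [f x]) = l.map f := by
  induction l <;> simp_all

-- normal form shared by both ports
def pvNF (cs : List Char) (n : Nat) (bpos : List Nat) : List String :=
  ((List.range n).filter (fun i => decide (cs.getD i ' ' = 'A'))).flatMap
    (fun i =>
      (((List.range' (i + 1) (n - (i + 1))).filter
          (fun j => decide (cs.getD j ' ' = 'B'))) ++ bpos).map (pvSliceAB cs i))

theorem pvA_eq_nf (cs : List Char) :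
    (List.range cs.length).foldl (fun substrings i =>
      if cs.getD i ' ' = 'A' then
        (List.range' (i + 1) (cs.length - (i + 1))).foldl (fun substrings j =>
          if cs.getD j ' ' = 'B' then substrings ++ [pvSliceAB cs i j] else substrings)
          substrings
      else substrings) []
      = pvNF cs cs.length [] := by
  have hstep : (fun (substrings : List String) (i : Nat) =>
      if cs.getD i ' ' = 'A' then
        (List.range' (i + 1) (cs.length - (i + 1))).foldl (fun substrings j =>
          if cs.getD j ' ' = 'B' then substrings ++ [pvSliceAB cs i j] else substrings)
          substrings
      else substrings)
      = (fun (substrings : List String) (i : Nat) =>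
        if cs.getD i ' ' = 'A' then
          substrings ++
            ((List.range' (i + 1) (cs.length - (i + 1))).filter
              (fun j => decide (cs.getD j ' ' = 'B'))).flatMap (fun j => [pvSliceAB cs i j])
        else substrings) := by
    funext substrings i
    by_cases hA : cs.getD i ' ' = 'A'
    · simp only [if_pos hA]
      exact pv_foldl_condAppend (fun j => cs.getD j ' ' = 'B') (fun j => [pvSliceAB cs i j]) _ substrings
    · simp only [if_neg hA]
  rw [hstep,
    pv_foldl_condAppend (fun i => cs.getD i ' ' = 'A')
      (fun i => ((List.range' (i + 1) (cs.length - (i + 1))).filter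
        (fun j => decide (cs.getD j ' ' = 'B'))).flatMap (fun j => [pvSliceAB cs i j]))]
  simp [pvNF, pv_flatMap_singleton]

-- B's loop invariant: the fold over range(n) processed right-to-left computes the
-- normal form over [0, n) on top of an arbitrary starting state
theorem pvB_loop (cs : List Char) :
    ∀ (n : Nat) (out : List String) (bpos : List Nat),
      (List.range n).reverse.foldl (pvAltStep cs) (out, bpos)
        = (pvNF cs n bpos ++ out,
           (List.range n).filter (fun j => decide (cs.getD j ' ' = 'B')) ++ bpos) := by
  intro n
  induction n with
  | zero => intro out bpos; simp [pvNF]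
  | succ n ih =>
    intro out bpos
    have hr : (List.range (n + 1)).reverse = n :: (List.range n).reverse := by
      simp [List.range_succ]
    rw [hr, List.foldl_cons, ih]
    refine Prod.ext ?_ ?_
    · -- out component
      show pvNF cs n (if cs[n]?.getD ' ' = 'B' then n :: bpos else bpos) ++
          (if cs[n]?.getD ' ' = 'A' then bpos.map (fun j => pvSliceAB cs n j) ++ out else out)
        = pvNF cs (n + 1) bpos ++ out
      have hnf : pvNF cs (n + 1) bpos
          = pvNF cs n (if cs[n]?.getD ' ' = 'B' then n :: bpos else bpos)
            ++ (if cs[n]?.getD ' ' = 'A' then bpos.map (fun j => pvSliceAB cs n j) else []) := by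
        unfold pvNF
        rw [List.range_succ, List.filter_append, List.flatMap_append]
        congr 1
        · -- inner lists coincide for i < n
          apply List.flatMap_congr
          intro i hi
          have hin : i < n := List.mem_range.mp (List.mem_filter.mp hi).1
          have hsplit : List.range' (i + 1) (n + 1 - (i + 1))
              = List.range' (i + 1) (n - (i + 1)) ++ [n] := by
            have h1 : n + 1 - (i + 1) = (n - (i + 1)) + 1 := by omega
            have h2 : i + 1 + (n - (i + 1)) = n := by omega
            rw [h1, List.range'_1_concat, h2]
          rw [hsplit, List.filter_append]
          by_cases hB : cs[n]?.getD ' ' = 'B' <;>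
            simp [hB, List.append_assoc]
        · -- the new index n
          by_cases hA : cs[n]?.getD ' ' = 'A'
          · simp [hA]
          · simp [hA]
      rw [hnf, List.append_assoc]
      by_cases hA : cs[n]?.getD ' ' = 'A' <;> simp [hA]
    · -- bpos component
      show (List.range n).filter (fun j => decide (cs.getD j ' ' = 'B')) ++
          (if cs[n]?.getD ' ' = 'B' then n :: bpos else bpos)
        = (List.range (n + 1)).filter (fun j => decide (cs.getD j ' ' = 'B')) ++ bpos
      rw [List.range_succ, List.filter_append]
      by_cases hB : cs[n]?.getD ' ' = 'B' <;> simp [hB]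

-- ===== VERDICT (by name: the statement is the Claim_ definition above) =====
theorem generate_substrings_spec : Claim_equal_generate_substrings := by
  intro s _
  unfold Spec_generate_substrings
  have hA : generate_substrings s = pvNF s.toList s.toList.length [] := pvA_eq_nf s.toList
  have hB := congrArg Prod.fst (pvB_loop s.toList s.toList.length [] [])
  simp only [List.append_nil] at hB
  exact hA.trans hB.symm
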